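-- pv_equiv track=rewrite | github.com/macrossfev/sampling-project | backend/services/plan_generator.py | _parse_custom_months
-- ===== SOURCE A (Python) =====
-- def _parse_custom_months(raw: str | None) -> list[int] | None:
--     """Parse comma-separated custom month string. Returns None if not set."""
--     if not raw or not raw.strip():
--         return None
--     try:
--         months = [int(m.strip()) for m in raw.split(",") if m.strip()]
--         result = sorted(m for m in months if 1 <= m <= 12)
--         return result if result else None
--     except ValueError:
--         return None
-- ===== SOURCE B (Python) =====
-- def _parse_custom_months(raw):
--     """Parse comma-separated custom month string. Returns None if not set."""
--     if not raw or not raw.strip():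
--         return None
--     counts = [0] * 13
--     for part in raw.split(","):
--         tok = part.strip()
--         if not tok:
--             continue
--         try:
--             v = int(tok)
--         except ValueError:
--             return None
--         if 1 <= v <= 12:
--             counts[v] += 1
--     result = [m for m in range(1, 13) for _ in range(counts[m])]
--     return result or None
-- ===== Notes on version B (the rewrite author's own statement) =====
-- stated objective: alternative
-- what changed: Replaces A's parse-all comprehension + filter + sorted() pipeline by one fused pass over the comma tokens that parses each token individually and counts in-range months into a fixed 13-bucket table, then emits months 1..12 counts[m] times (counting sort).
import Mathlib
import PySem

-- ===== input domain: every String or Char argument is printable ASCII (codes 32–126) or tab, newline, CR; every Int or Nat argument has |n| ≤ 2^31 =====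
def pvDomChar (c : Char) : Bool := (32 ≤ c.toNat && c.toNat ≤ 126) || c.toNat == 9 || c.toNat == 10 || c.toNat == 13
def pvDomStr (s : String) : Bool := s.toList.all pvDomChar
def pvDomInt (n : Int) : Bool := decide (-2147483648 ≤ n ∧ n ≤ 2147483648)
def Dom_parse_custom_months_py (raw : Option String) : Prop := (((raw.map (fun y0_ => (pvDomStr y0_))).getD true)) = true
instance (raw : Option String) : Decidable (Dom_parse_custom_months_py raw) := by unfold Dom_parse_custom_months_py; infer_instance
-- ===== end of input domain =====

-- B replaces A's parse-all + filter + sorted() pipeline by one fused pass that parses each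
-- comma token individually and counts in-range months into a 13-bucket table (counting sort).

-- ===== PORT A =====
def parse_custom_months_py (raw : Option String) : Option (List Int) :=
  match raw with
  | none => none
  | some s =>
    if s = "" then none
    else if PySem.Chars.strip s.toList = [] then none
    else
      match (((PySem.Chars.splitOn s.toList [',']).filter
              (fun m => PySem.Chars.strip m ≠ [])).mapM
              (fun m => PySem.Int.ofChars? (PySem.Chars.strip m))) with
      | none => none   -- int() raised ValueError
      | some months =>
        let result := PySem.List.sorted
          (months.filter (fun m => decide (1 ≤ m) && decide (m ≤ 12))) (fun x => x) false
        if result = [] then none else some result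

-- ===== PORT B =====
-- the fused for-loop of Source B: strip each part, skip empties, parse (none = ValueError →
-- whole call returns None), bump the bucket of an in-range month
def pvCountLoop : List (List Char) → List Int → Option (List Int)
  | [], counts => some counts
  | part :: rest, counts =>
    let tok := PySem.Chars.strip part
    if tok = [] then pvCountLoop rest counts
    else
      match PySem.Int.ofChars? tok with
      | none => none
      | some v =>
        if 1 ≤ v ∧ v ≤ 12 then
          pvCountLoop rest (PySem.List.pySetD counts v (PySem.List.pyGetD counts v 0 + 1))
        else pvCountLoop rest counts

def parse_custom_months_py_alt (raw : Option String) : Option (List Int) :=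
  match raw with
  | none => none
  | some s =>
    if s = "" then none
    else if PySem.Chars.strip s.toList = [] then none
    else
      match pvCountLoop (PySem.Chars.splitOn s.toList [',']) (List.replicate 13 (0 : Int)) with
      | none => none
      | some counts =>
        let result := (PySem.List.pyRange 1 13 1).flatMap
          (fun m => List.replicate (PySem.List.pyGetD counts m 0).toNat m)
        if result = [] then none else some result

-- ===== PRECONDITION & SPEC =====
def Spec_parse_custom_months_py (raw : Option String) (out : Option (List Int)) : Prop := out = parse_custom_months_py_alt raw
instance (raw : Option String) (out : Option (List Int)) : Decidable (Spec_parse_custom_months_py raw out) := by unfold Spec_parse_custom_months_py; infer_instance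

-- ===== CLAIM (what is proved, stated in full; the proofs are below) =====
def Claim_equal_parse_custom_months_py : Prop := ∀ (raw : Option String), Dom_parse_custom_months_py raw → Spec_parse_custom_months_py raw (parse_custom_months_py raw)

-- ===== LEMMAS AND PROOFS =====

-- B's fused loop equals: parse the stripped non-empty tokens (A's mapM) and, on success,
-- fold the counting step over the parsed months
theorem pv_countLoop_eq (parts : List (List Char)) (counts : List Int) :
    pvCountLoop parts counts
    = ((parts.filter (fun m => PySem.Chars.strip m ≠ [])).mapM
        (fun m => PySem.Int.ofChars? (PySem.Chars.strip m))).map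
        (fun months => months.foldl
          (fun c m => if 1 ≤ m ∧ m ≤ 12
                      then PySem.List.pySetD c m (PySem.List.pyGetD c m 0 + 1)
                      else c) counts) := by
  induction parts generalizing counts with
  | nil => simp [pvCountLoop]
  | cons p rest ih =>
    by_cases hp : PySem.Chars.strip p = []
    · simp [pvCountLoop, hp, ih]
    · rw [List.filter_cons_of_pos (by simpa using hp)]
      simp only [pvCountLoop, if_neg hp]
      cases hv : PySem.Int.ofChars? (PySem.Chars.strip p) with
      | none => simp [List.mapM_cons, hv]
      | some v =>
        cases hrest : ((rest.filter (fun m => !decide (PySem.Chars.strip m = []))).mapM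
                (fun m => PySem.Int.ofChars? (PySem.Chars.strip m))) with
        | none =>
          by_cases hr : 1 ≤ v ∧ v ≤ 12 <;>
            simp [hr, ih, List.mapM_cons, hv, hrest]
        | some months =>
          by_cases hr : 1 ≤ v ∧ v ≤ 12 <;>
            simp [hr, ih, List.mapM_cons, hv, hrest]

-- counting-loop invariant: after processing ms, bucket i holds g i plus the number of
-- in-range occurrences of i in ms
theorem pv_counts_inv (ms : List Int) (g : Nat → Int) :
    ms.foldl
      (fun c m => if 1 ≤ m ∧ m ≤ 12
                  then PySem.List.pySetD c m (PySem.List.pyGetD c m 0 + 1)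
                  else c)
      ((List.range 13).map (fun i => g i))
    = (List.range 13).map
        (fun i => g i + ((ms.filter (fun m => decide (1 ≤ m) && decide (m ≤ 12))).count (i : Int) : Int)) := by
  induction ms generalizing g with
  | nil => simp
  | cons m ms ih =>
    simp only [List.foldl_cons]
    by_cases hm : 1 ≤ m ∧ m ≤ 12
    · have h0 : (0 : Int) ≤ m := by omega
      have hlt : m.toNat < 13 := by omega
      rw [if_pos hm, PySem.List.pySetD_of_nonneg _ _ h0,
          PySem.List.pyGetD_of_nonneg _ _ h0, PySem.List.getD_map_range _ _ _ _ (by simpa using hlt)]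
      have hset : ((List.range 13).map (fun i => g i)).set m.toNat (g m.toNat + 1)
          = (List.range 13).map (fun i => if i = m.toNat then g i + 1 else g i) := by
        apply List.ext_getElem
        · simp
        · intro n h1 h2
          simp only [List.getElem_set, List.getElem_map, List.getElem_range]
          split
          · simp_all
          · simp_all
            omega
      rw [hset, ih]
      apply List.map_congr_left
      intro i hi
      simp only [List.mem_range] at hi
      have hcnt : (List.filter (fun m => decide (1 ≤ m) && decide (m ≤ 12)) (m :: ms))
          = m :: List.filter (fun m => decide (1 ≤ m) && decide (m ≤ 12)) ms := by
        simp [hm.1, hm.2]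
      rw [hcnt, List.count_cons]
      by_cases hie : m = (i : Int)
      · subst hie
        simp
        ring
      · have : ¬ (i = m.toNat) := by omega
        simp [hie, this]
    · rw [if_neg hm, ih]
      apply List.map_congr_left
      intro i hi
      have hcnt : (List.filter (fun m => decide (1 ≤ m) && decide (m ≤ 12)) (m :: ms))
          = List.filter (fun m => decide (1 ≤ m) && decide (m ≤ 12)) ms := by
        rcases not_and_or.mp hm with h | h <;> simp [h]
      rw [hcnt]

-- counting elements of a concatenation of constant blocks over distinct keys
theorem pv_count_blocks (ks : List Int) (c : Int → Nat) (hnd : ks.Nodup) (x : Int) :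
    (ks.flatMap (fun i => List.replicate (c i) i)).count x = if x ∈ ks then c x else 0 := by
  induction ks with
  | nil => simp
  | cons k ks ih =>
    have hnd' := hnd
    rw [List.nodup_cons] at hnd'
    simp only [List.flatMap_cons, List.count_append, List.count_replicate, ih hnd'.2, List.mem_cons]
    by_cases hk : x = k
    · subst hk
      simp [hnd'.1]
    · simp [hk, Ne.symm hk]

-- the block concatenation is sorted when the keys are
theorem pv_blocks_pairwise (ks : List Int) (c : Int → Nat) (h : ks.Pairwise (· ≤ ·)) :
    (ks.flatMap (fun i => List.replicate (c i) i)).Pairwise (· ≤ ·) := by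
  induction ks with
  | nil => simp
  | cons k ks ih =>
    rw [List.pairwise_cons] at h
    simp only [List.flatMap_cons]
    rw [List.pairwise_append]
    refine ⟨List.pairwise_replicate.mpr (Or.inr le_rfl), ih h.2, ?_⟩
    intro a ha b hb
    rw [List.eq_of_mem_replicate ha]
    obtain ⟨i, hi, hbi⟩ := List.mem_flatMap.mp hb
    rw [List.eq_of_mem_replicate hbi]
    exact h.1 i hi

-- main lemma: sorted(filtered) equals the bucket-emitted list
theorem pv_sorted_eq_blocks (l : List Int) (hall : ∀ x ∈ l, 1 ≤ x ∧ x ≤ 12) :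
    PySem.List.sorted l (fun x => x) false
    = ([1,2,3,4,5,6,7,8,9,10,11,12] : List Int).flatMap (fun i => List.replicate (l.count i) i) := by
  apply PySem.List.sorted_id_eq_of_perm_of_pairwise
  · rw [List.perm_iff_count]
    intro x
    rw [pv_count_blocks _ _ (by decide) x]
    split
    · rfl
    · rename_i hx
      symm
      rw [List.count_eq_zero]
      intro hmem
      refine hx ?_
      have := hall x hmem
      simp only [List.mem_cons, List.not_mem_nil, or_false]
      omega
  · exact pv_blocks_pairwise _ _ (by decide)

-- ===== VERDICT (by name: the statement is the Claim_ definition above) =====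
theorem parse_custom_months_py_spec : Claim_equal_parse_custom_months_py := by
  intro raw _
  unfold Spec_parse_custom_months_py parse_custom_months_py parse_custom_months_py_alt
  match raw with
  | none => rfl
  | some s =>
    by_cases h1 : s = ""
    · simp [h1]
    by_cases h2 : PySem.Chars.strip s.toList = []
    · simp [h1, h2]
    simp only [if_neg h1, if_neg h2]
    rw [pv_countLoop_eq]
    cases hp : (((PySem.Chars.splitOn s.toList [',']).filter
              (fun m => PySem.Chars.strip m ≠ [])).mapM
              (fun m => PySem.Int.ofChars? (PySem.Chars.strip m))) with
    | none => simp
    | some months =>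
      simp only [Option.map_some]
      set fl := months.filter (fun m => decide (1 ≤ m) && decide (m ≤ 12)) with hfl
      have hall : ∀ x ∈ fl, 1 ≤ x ∧ x ≤ 12 := by
        intro x hx
        rw [hfl, List.mem_filter] at hx
        simpa using hx.2
      have hcounts : months.foldl
          (fun c m => if 1 ≤ m ∧ m ≤ 12
                      then PySem.List.pySetD c m (PySem.List.pyGetD c m 0 + 1)
                      else c)
          (List.replicate 13 (0 : Int))
          = (List.range 13).map (fun (i : Nat) => (fl.count (i : Int) : Int)) := by
        have h0 : (List.replicate 13 (0 : Int)) = (List.range 13).map (fun _ => (0 : Int)) := by decide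
        rw [h0, pv_counts_inv months (fun _ => 0)]
        simp [hfl]
      rw [hcounts]
      have hrange : PySem.List.pyRange 1 13 1 = ([1,2,3,4,5,6,7,8,9,10,11,12] : List Int) := by decide
      rw [hrange]
      have hget : ∀ i : Int, 1 ≤ i → i ≤ 12 →
          (PySem.List.pyGetD ((List.range 13).map (fun (j : Nat) => (fl.count (j : Int) : Int))) i 0).toNat
          = fl.count i := by
        intro i hi1 hi2
        rw [PySem.List.pyGetD_of_nonneg _ _ (by omega),
            PySem.List.getD_map_range _ _ _ _ (by omega)]
        simp only [Int.toNat_natCast]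
        congr 1
        omega
      have hflat : ([1,2,3,4,5,6,7,8,9,10,11,12] : List Int).flatMap
            (fun month => List.replicate (PySem.List.pyGetD ((List.range 13).map (fun (j : Nat) => (fl.count (j : Int) : Int))) month 0).toNat month)
          = ([1,2,3,4,5,6,7,8,9,10,11,12] : List Int).flatMap (fun i => List.replicate (fl.count i) i) := by
        apply List.flatMap_congr
        intro i hi
        rw [hget i (by fin_cases hi <;> decide) (by fin_cases hi <;> decide)]
      rw [hflat, ← pv_sorted_eq_blocks fl hall]
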